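-- pv_equiv track=rewrite | github.com/NikaAb/-BCR-tool-comparison | Analysis/VDJ_assign_test/Code/format_mixcr.py | creatdico
-- ===== SOURCE A (Python) =====
-- def creatdico(lines):
-- 	dico={}
-- 	for l in range(1,len(lines)):
-- 		SeqID=lines[l].split("\t")[0]
-- 		CloneID=lines[l].split("\t")[1][:-1]
-- 		if CloneID in dico.keys():
-- 			dico[CloneID].append(SeqID)
-- 		else:
-- 			dico[CloneID]=[SeqID]
-- 	return dico
-- ===== SOURCE B (Python) =====
-- def creatdico(lines):
--     # Two-phase grouping: extract (clone, seq) pairs, dedup clone keys in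
--     # first-occurrence order, then build each group with a filtering comprehension.
--     pairs = [(l.split("\t")[1][:-1], l.split("\t")[0]) for l in lines[1:]]
--     order = list(dict.fromkeys(c for c, _ in pairs))
--     return {c: [s for cc, s in pairs if cc == c] for c in order}
-- ===== Notes on version B (the rewrite author's own statement) =====
-- stated objective: alternative
-- what changed: Replaces A's incremental dict build (contains-test then append-or-insert per line) by a two-phase grouping: extract all (clone, seq) pairs, dedup the clone keys in first-occurrence order via dict.fromkeys, then build each group with a filtering comprehension per key.
import Mathlib
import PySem

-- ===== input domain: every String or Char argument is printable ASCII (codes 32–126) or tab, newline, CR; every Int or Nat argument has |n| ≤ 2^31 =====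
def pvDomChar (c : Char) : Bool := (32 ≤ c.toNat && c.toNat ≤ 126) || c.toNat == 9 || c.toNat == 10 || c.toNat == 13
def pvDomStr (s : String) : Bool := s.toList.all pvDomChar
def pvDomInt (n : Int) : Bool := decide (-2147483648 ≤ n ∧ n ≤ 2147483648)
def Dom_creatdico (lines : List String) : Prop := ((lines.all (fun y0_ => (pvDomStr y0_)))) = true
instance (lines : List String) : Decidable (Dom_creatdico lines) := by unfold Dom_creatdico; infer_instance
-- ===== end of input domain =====

-- B replaces A's incremental dict (contains-test, append-or-insert) by a two-phase grouping:
-- extract (clone, seq) pairs, dedup the clone keys in first-occurrence order, then build each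
-- group with one filtering pass per key; same return value, alternative structure (not faster).


-- ===== PORT A =====
def creatdico (lines : List String) : List (String × List String) :=
  let dico : PySem.Dict String (List String) :=
    (PySem.List.pyRange 1 (PySem.List.len lines)).foldl
      (fun dico l =>
        let line := PySem.List.pyGetD lines l ""
        let seqID := PySem.List.pyGetD ((PySem.Str.split? line "\t").getD []) 0 ""
        let cloneID := PySem.Str.slice (PySem.List.pyGetD ((PySem.Str.split? line "\t").getD []) 1 "") none (some (-1))
        if dico.contains cloneID then
          dico.modify cloneID [] (fun v => v ++ [seqID])      -- dico[CloneID].append(SeqID)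
        else
          dico.insert cloneID [seqID])                        -- dico[CloneID] = [SeqID]
      PySem.Dict.empty
  dico.items

-- ===== PORT B =====
def creatdico_alt (lines : List String) : List (String × List String) :=
  let pairs : List (String × String) :=
    (lines.drop 1).map (fun l =>
      (PySem.Str.slice (PySem.List.pyGetD ((PySem.Str.split? l "\t").getD []) 1 "") none (some (-1)),
       PySem.List.pyGetD ((PySem.Str.split? l "\t").getD []) 0 ""))
  let order := PySem.List.dedup (pairs.map (·.1))
  order.map (fun c => (c, (pairs.filter (fun p => p.1 == c)).map (·.2)))

-- ===== PRECONDITION & SPEC =====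
-- Pre_ excludes exactly the inputs where Python A raises IndexError: a data line with no tab,
-- where split("\t") has fewer than two pieces (B raises there too).
def Pre_creatdico (lines : List String) : Prop :=
  ∀ s ∈ lines.drop 1, 2 ≤ ((PySem.Str.split? s "\t").getD []).length
instance (lines : List String) : Decidable (Pre_creatdico lines) := by unfold Pre_creatdico; infer_instance

def pvWitness_creatdico : List String :=
  ["SeqID\tCloneID\n", "s1\tc1\n", "s2\tc2\n", "s3\tc1\n"]

def Spec_creatdico (lines : List String) (out : List (String × List String)) : Prop := out = creatdico_alt lines
instance (lines : List String) (out : List (String × List String)) : Decidable (Spec_creatdico lines out) := by unfold Spec_creatdico; infer_instance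

-- ===== CLAIM (what is proved, stated in full; the proofs are below) =====
def Claim_equal_creatdico : Prop := ∀ (lines : List String), Dom_creatdico lines → Pre_creatdico lines → Spec_creatdico lines (creatdico lines)

-- ===== LEMMAS AND PROOFS =====

-- the per-line parse both programs perform
def pvParse (l : String) : String × String :=
  (PySem.Str.slice (PySem.List.pyGetD ((PySem.Str.split? l "\t").getD []) 1 "") none (some (-1)),
   PySem.List.pyGetD ((PySem.Str.split? l "\t").getD []) 0 "")

-- A's loop body is exactly Dict.modify: on a fresh key, modify inserts f [] = [s]
theorem pv_step_eq (d : PySem.Dict String (List String)) (c s : String) :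
    (if d.contains c then d.modify c [] (fun v => v ++ [s]) else d.insert c [s])
      = d.modify c [] (fun v => v ++ [s]) := by
  by_cases h : d.contains c = true
  · simp [h]
  · simp only [Bool.not_eq_true] at h
    simp [h, PySem.Dict.modify, PySem.Dict.getD_of_not_contains _ _ h]

theorem pv_groups (P : List (String × String)) :
    (P.foldl (fun d p => d.modify p.1 [] (fun v => v ++ [p.2])) PySem.Dict.empty).items
      = (PySem.Set.ofList (P.map (·.1))).map
          (fun c => (c, (P.filter (fun p => p.1 == c)).map (·.2))) := by
  have hnd : (P.foldl (fun d p => d.modify p.1 [] (fun v => v ++ [p.2]))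
      (PySem.Dict.empty : PySem.Dict String (List String))).keys.Nodup :=
    PySem.Dict.nodup_keys_foldl_modify_key P (·.1) [] (fun _ p v => v ++ [p.2]) _
      PySem.Dict.nodup_keys_empty
  rw [PySem.Dict.items_eq_map_keys _ hnd []]
  rw [PySem.Dict.keys_foldl_modify_key P (·.1) [] (fun _ p v => v ++ [p.2])]
  simp
  refine List.map_congr_left (fun c _ => ?_)
  rw [PySem.Dict.getD_foldl_modify_append]
  simp

theorem creatdico_spec' (lines : List String) : creatdico lines = creatdico_alt lines := by
  have hA := congrArg PySem.Dict.items
    (PySem.List.foldl_pyRange_pyGetD lines ""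
      (fun (d : PySem.Dict String (List String)) line =>
        if d.contains (pvParse line).1 then d.modify (pvParse line).1 [] (fun v => v ++ [(pvParse line).2])
        else d.insert (pvParse line).1 [(pvParse line).2])
      PySem.Dict.empty (show (0:Int) ≤ 1 by norm_num))
  have hmap := (List.foldl_map
    (f := pvParse)
    (g := fun (d : PySem.Dict String (List String)) p =>
      if d.contains p.1 then d.modify p.1 [] (fun v => v ++ [p.2]) else d.insert p.1 [p.2])
    (l := lines.drop 1) (init := PySem.Dict.empty)).symm
  have hB : (((lines.drop 1).map pvParse).foldl
      (fun (d : PySem.Dict String (List String)) p =>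
        if d.contains p.1 then d.modify p.1 [] (fun v => v ++ [p.2]) else d.insert p.1 [p.2])
      PySem.Dict.empty).items = creatdico_alt lines := by
    have hstep : (fun (d : PySem.Dict String (List String)) (p : String × String) =>
        if d.contains p.1 then d.modify p.1 [] (fun v => v ++ [p.2]) else d.insert p.1 [p.2])
        = fun d p => d.modify p.1 [] (fun v => v ++ [p.2]) :=
      funext fun d => funext fun p => pv_step_eq d p.1 p.2
    rw [hstep, pv_groups]
    unfold creatdico_alt
    simp only [PySem.List.dedup_eq_ofList, List.map_map]
    rfl
  exact hA.trans ((congrArg PySem.Dict.items hmap).trans hB)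

-- ===== VERDICT (by name: the statement is the Claim_ definition above) =====
theorem creatdico_spec : Claim_equal_creatdico := by
  intro lines _ _
  exact creatdico_spec' lines
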